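-- pv_equiv track=rewrite | github.com/Zxiro/Apriori | fpg.py | ele_in_trans_in_seq
-- ===== SOURCE A (Python) =====
-- def ele_in_trans_in_seq(tran_lis, feq_dict):#Order the transaction with the decreasing order of the item
--     trans_in_seq = []
--     tmp_ = []
--     sor_dict = []
--     tmp_dict = {}
--     for tran in tran_lis:
--         for e in tran:
--             for set_ in feq_dict:
--                 if(e == set_):
--                     tmp_dict[str(e)] = feq_dict[set_] #出現次數
--                     break
--         sor_dict.append(tmp_dict)
--         tmp_dict = {}
--     for set_ in sor_dict:
--         r = sorted(sorted(set_.items(), key = lambda i : i) ,key = lambda k : k[1], reverse = True)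
--         for i in r:
--             tmp_.append(i[0])
--         trans_in_seq.append(tmp_)
--         tmp_ = []
--
--     return trans_in_seq
-- ===== SOURCE B (Python) =====
-- def ele_in_trans_in_seq(tran_lis, feq_dict):
--     # one global sort (frequency descending, then str(key) ascending), then a
--     # membership filter per transaction instead of sorting each transaction
--     ranked = sorted(feq_dict.items(), key=lambda kv: (-kv[1], str(kv[0])))
--     keys_ranked = [kv[0] for kv in ranked]
--     result = []
--     for tran in tran_lis:
--         present = {e for e in tran if e in feq_dict}
--         result.append([str(k) for k in keys_ranked if k in present])
--     return result
-- ===== Notes on version B (the rewrite author's own statement) =====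
-- stated objective: faster
-- what changed: A builds a per-transaction dict and sorts it twice for every transaction; B sorts the frequency dict once globally by (-frequency, str(key)) and then emits each transaction's present keys by filtering that precomputed order with a membership set.
import Mathlib
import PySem

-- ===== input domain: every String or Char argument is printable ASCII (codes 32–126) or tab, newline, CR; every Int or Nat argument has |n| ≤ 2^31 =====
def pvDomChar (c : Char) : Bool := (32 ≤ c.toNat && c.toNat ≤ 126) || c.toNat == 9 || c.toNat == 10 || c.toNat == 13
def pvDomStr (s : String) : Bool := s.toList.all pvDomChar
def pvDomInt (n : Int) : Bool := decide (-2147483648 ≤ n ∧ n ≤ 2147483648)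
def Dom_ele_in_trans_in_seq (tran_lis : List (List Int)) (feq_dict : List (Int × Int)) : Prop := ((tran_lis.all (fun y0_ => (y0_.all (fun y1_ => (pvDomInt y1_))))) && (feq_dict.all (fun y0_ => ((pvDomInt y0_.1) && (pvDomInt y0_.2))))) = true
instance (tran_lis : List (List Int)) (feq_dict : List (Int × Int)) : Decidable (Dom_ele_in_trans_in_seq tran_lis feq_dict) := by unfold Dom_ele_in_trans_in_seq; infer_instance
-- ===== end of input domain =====

-- B replaces A's per-transaction double sort by ONE global sort of the dict plus a
-- membership filter per transaction (objective: faster per-transaction work; equal results proved below).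

-- ===== PORT A =====
-- inner loop 'for set_ in feq_dict: if e == set_: tmp_dict[str(e)] = feq_dict[set_]; break':
-- the scan stops at the FIRST pair whose key equals e, and feq_dict[set_] is then exactly
-- that pair's value (first-match lookup), so the pair's own value v is used.
def pvScanA (pairs : List (Int × Int)) (d : PySem.Dict String Int) (e : Int) : PySem.Dict String Int :=
  match pairs with
  | [] => d
  | (k, v) :: rest => if e == k then d.insert (PySem.Int.toStr e) v else pvScanA rest d e

def ele_in_trans_in_seq (tran_lis : List (List Int)) (feq_dict : List (Int × Int)) : List (List String) :=
  let sor_dict := tran_lis.foldl (fun sor tran =>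
      sor ++ [tran.foldl (fun tmp_dict e => pvScanA feq_dict tmp_dict e) PySem.Dict.empty]) []
  sor_dict.foldl (fun trans set_ =>
      let r := PySem.List.sorted (PySem.List.sorted2 set_.items (fun i => i.1) (fun i => i.2)) (fun k => k.2) true
      trans ++ [r.foldl (fun tmp i => tmp ++ [i.1]) []]) []

-- ===== PORT B =====
def ele_in_trans_in_seq_alt (tran_lis : List (List Int)) (feq_dict : List (Int × Int)) : List (List String) :=
  let ranked := PySem.List.sorted2 feq_dict (fun kv => -kv.2) (fun kv => PySem.Int.toStr kv.1)
  let keys_ranked := ranked.map (fun kv => kv.1)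
  tran_lis.map (fun tran =>
    let present : PySem.Set Int := PySem.Set.ofList (tran.filter (fun e => (PySem.Dict.mk feq_dict).contains e))
    (keys_ranked.filter (fun k => PySem.Set.contains present k)).map (fun k => PySem.Int.toStr k))

-- ===== PRECONDITION & SPEC =====
-- Pre_ excludes association lists with a duplicated key: those do not encode a Python dict
-- (A's feq_dict parameter is a dict, whose keys are necessarily unique), so no behaviour of
-- the Python programs corresponds to them.
def Pre_ele_in_trans_in_seq (tran_lis : List (List Int)) (feq_dict : List (Int × Int)) : Prop :=
  (feq_dict.map Prod.fst).Nodup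
instance (tran_lis : List (List Int)) (feq_dict : List (Int × Int)) : Decidable (Pre_ele_in_trans_in_seq tran_lis feq_dict) := by unfold Pre_ele_in_trans_in_seq; infer_instance

def pvWitness_ele_in_trans_in_seq : List (List Int) × (List (Int × Int)) := ([[1, 2], [2, 3]], [(1, 2), (2, 1)])

def Spec_ele_in_trans_in_seq (tran_lis : List (List Int)) (feq_dict : List (Int × Int)) (out : List (List String)) : Prop := out = ele_in_trans_in_seq_alt tran_lis feq_dict
instance (tran_lis : List (List Int)) (feq_dict : List (Int × Int)) (out : List (List String)) : Decidable (Spec_ele_in_trans_in_seq tran_lis feq_dict out) := by unfold Spec_ele_in_trans_in_seq; infer_instance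

-- ===== CLAIM (what is proved, stated in full; the proofs are below) =====
def Claim_equal_ele_in_trans_in_seq : Prop := ∀ (tran_lis : List (List Int)) (feq_dict : List (Int × Int)), Dom_ele_in_trans_in_seq tran_lis feq_dict → Pre_ele_in_trans_in_seq tran_lis feq_dict → Spec_ele_in_trans_in_seq tran_lis feq_dict (ele_in_trans_in_seq tran_lis feq_dict)

-- ===== LEMMAS AND PROOFS =====

-- ---- injectivity of str(int) ----

lemma pv_digitChar_inj (a b : Nat) (ha : a < 10) (hb : b < 10)
    (h : Nat.digitChar a = Nat.digitChar b) : a = b := by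
  interval_cases a <;> interval_cases b <;> revert h <;> decide

lemma pv_digitChar_ne_dash (a : Nat) (ha : a < 10) : Nat.digitChar a ≠ '-' := by
  interval_cases a <;> decide

lemma pv_toDigitsCore_eq (f : Nat) : ∀ (n : Nat) (acc : List Char), 0 < n → n < f →
    Nat.toDigitsCore 10 f n acc = ((Nat.digits 10 n).map Nat.digitChar).reverse ++ acc := by
  induction f with
  | zero => intro n acc hn hf; omega
  | succ f ih =>
    intro n acc hn hf
    rw [Nat.toDigitsCore]
    have hdig : Nat.digits 10 n = n % 10 :: Nat.digits 10 (n / 10) :=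
      Nat.digits_def' (by norm_num) hn
    by_cases h0 : n / 10 = 0
    · simp [h0, hdig]
    · have hlt : n / 10 < n := Nat.div_lt_self hn (by norm_num)
      simp only [h0, if_false]
      rw [ih (n / 10) _ (Nat.pos_of_ne_zero h0) (by omega), hdig]
      simp

lemma pv_toDigits_eq (n : Nat) (hn : 0 < n) :
    Nat.toDigits 10 n = ((Nat.digits 10 n).map Nat.digitChar).reverse := by
  rw [Nat.toDigits, pv_toDigitsCore_eq (n + 1) n [] hn (by omega), List.append_nil]

lemma pv_toDigits_ne_dash (n : Nat) : '-' ∉ Nat.toDigits 10 n := by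
  rcases Nat.eq_zero_or_pos n with h | h
  · subst h; decide
  · rw [pv_toDigits_eq n h]
    intro hm
    simp only [List.mem_reverse, List.mem_map] at hm
    obtain ⟨d, hd, hdc⟩ := hm
    exact pv_digitChar_ne_dash d (Nat.digits_lt_base (by norm_num) hd) hdc

lemma pv_map_digitChar_inj : ∀ (l1 l2 : List Nat), (∀ x ∈ l1, x < 10) → (∀ x ∈ l2, x < 10) →
    l1.map Nat.digitChar = l2.map Nat.digitChar → l1 = l2 := by
  intro l1
  induction l1 with
  | nil => intro l2 _ _ h; cases l2 <;> simp_all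
  | cons a l1 ih =>
    intro l2 h1 h2 h
    cases l2 with
    | nil => simp_all
    | cons b l2 =>
      simp only [List.map_cons, List.cons.injEq] at h
      have hab := pv_digitChar_inj a b (h1 a (by simp)) (h2 b (by simp)) h.1
      have := ih l2 (fun x hx => h1 x (by simp [hx])) (fun x hx => h2 x (by simp [hx])) h.2
      simp [hab, this]

lemma pv_toDigits_inj (m n : Nat) (h : Nat.toDigits 10 m = Nat.toDigits 10 n) : m = n := by
  rcases Nat.eq_zero_or_pos m with hm | hm <;> rcases Nat.eq_zero_or_pos n with hn | hn
  · omega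
  · exfalso
    subst hm
    rw [pv_toDigits_eq n hn] at h
    have h'' : ['0'] = (Nat.digits 10 n).map Nat.digitChar := by
      simpa using congrArg List.reverse h
    have h' := h''.symm
    have h2 := pv_map_digitChar_inj (Nat.digits 10 n) [0]
      (fun x hx => Nat.digits_lt_base (by norm_num) hx) (by norm_num) (by rw [h']; decide)
    have h4 : n = Nat.ofDigits 10 (Nat.digits 10 n) := (Nat.ofDigits_digits 10 n).symm
    rw [h2] at h4
    simp [Nat.ofDigits] at h4
    omega
  · exfalso
    subst hn
    rw [pv_toDigits_eq m hm] at h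
    have h'' : ['0'] = (Nat.digits 10 m).map Nat.digitChar := by
      simpa using (congrArg List.reverse h).symm
    have h' := h''.symm
    have h2 := pv_map_digitChar_inj (Nat.digits 10 m) [0]
      (fun x hx => Nat.digits_lt_base (by norm_num) hx) (by norm_num) (by rw [h']; decide)
    have h4 : m = Nat.ofDigits 10 (Nat.digits 10 m) := (Nat.ofDigits_digits 10 m).symm
    rw [h2] at h4
    simp [Nat.ofDigits] at h4
    omega
  · rw [pv_toDigits_eq m hm, pv_toDigits_eq n hn] at h
    have h' := congrArg List.reverse h
    simp only [List.reverse_reverse] at h'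
    exact Nat.digits.injective 10 (pv_map_digitChar_inj _ _
      (fun x hx => Nat.digits_lt_base (by norm_num) hx)
      (fun x hx => Nat.digits_lt_base (by norm_num) hx) h')

lemma pv_toChars_inj : Function.Injective PySem.Int.toChars := by
  intro m n h
  unfold PySem.Int.toChars at h
  split_ifs at h with h1 h2 h2
  · have := pv_toDigits_inj m.natAbs n.natAbs (by simpa using h)
    omega
  · exact absurd (h ▸ List.mem_cons_self ..) (by simpa using pv_toDigits_ne_dash n.toNat)
  · exact absurd (h ▸ List.mem_cons_self ..) (by simpa using pv_toDigits_ne_dash m.toNat)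
  · have := pv_toDigits_inj m.toNat n.toNat h
    omega

lemma pv_toStr_inj : Function.Injective PySem.Int.toStr := by
  intro m n h
  apply pv_toChars_inj
  rw [← PySem.Int.toList_toStr, ← PySem.Int.toList_toStr, h]

-- ---- generic insertion-sort machinery ----

lemma pv_insertBy_eq_nil {α : Type} (bef : α → α → Bool) (x : α) :
    PySem.List.insertBy bef x [] = [x] := rfl

lemma pv_insertBy_eq_cons {α : Type} (bef : α → α → Bool) (x y : α) (ys : List α) :
    PySem.List.insertBy bef x (y :: ys) =
      if bef x y then x :: y :: ys else y :: PySem.List.insertBy bef x ys := rfl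

lemma pv_insertBy_pairwise {α : Type} (good : α → α → Prop) (bef : α → α → Bool)
    (side : α → α → Prop)
    (htrans : ∀ a b c, good a b → good b c → good a c)
    (h2 : ∀ x y, bef x y = true → side y x → good x y)
    (h3 : ∀ x y, bef x y = false → side y x → good y x) (x : α) :
    ∀ acc : List α, acc.Pairwise good → (∀ y ∈ acc, side y x) →
      (PySem.List.insertBy bef x acc).Pairwise good := by
  intro acc
  induction acc with
  | nil => intro _ _; simp [pv_insertBy_eq_nil]
  | cons y ys ih =>
    intro hp hs
    rw [pv_insertBy_eq_cons]
    rcases List.pairwise_cons.mp hp with ⟨hy, hys⟩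
    by_cases hb : bef x y = true
    · simp only [hb, if_true]
      refine List.pairwise_cons.mpr ⟨?_, hp⟩
      intro z hz
      rcases List.mem_cons.mp hz with rfl | hz'
      · exact h2 x z hb (hs z (by simp))
      · exact htrans x y z (h2 x y hb (hs y (by simp))) (hy z hz')
    · simp only [hb]
      refine List.pairwise_cons.mpr ⟨?_, ih hys (fun w hw => hs w (by simp [hw]))⟩
      intro z hz
      rcases (PySem.List.mem_insertBy bef x z ys).mp hz with rfl | hz'
      · exact h3 _ y (by simpa using hb) (hs y (by simp))
      · exact hy z hz'

lemma pv_foldl_insertBy_pairwise {α : Type} (good : α → α → Prop) (bef : α → α → Bool)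
    (side : α → α → Prop)
    (htrans : ∀ a b c, good a b → good b c → good a c)
    (h2 : ∀ x y, bef x y = true → side y x → good x y)
    (h3 : ∀ x y, bef x y = false → side y x → good y x) :
    ∀ (xs acc : List α), acc.Pairwise good → xs.Pairwise side →
      (∀ y ∈ acc, ∀ x ∈ xs, side y x) →
      (xs.foldl (fun acc x => PySem.List.insertBy bef x acc) acc).Pairwise good := by
  intro xs
  induction xs with
  | nil => intro acc h _ _; simpa using h
  | cons x xs ih =>
    intro acc hacc hside hcross
    rcases List.pairwise_cons.mp hside with ⟨hx, hxs⟩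
    simp only [List.foldl_cons]
    apply ih _ (pv_insertBy_pairwise good bef side htrans h2 h3 x acc hacc
      (fun y hy => hcross y hy x (by simp))) hxs
    intro y hy z hz
    rcases (PySem.List.mem_insertBy bef x y acc).mp hy with rfl | hy'
    · exact hx z hz
    · exact hcross y hy' z (by simp [hz])

lemma pv_sorted_unique {α : Type} (r : α → α → Prop)
    (hasym : ∀ a b, r a b → r b a → False) :
    ∀ (ys zs : List α), ys.Perm zs → ys.Pairwise r → zs.Pairwise r → ys = zs := by
  intro ys
  induction ys with
  | nil => intro zs hp _ _; simpa using hp.symm.eq_nil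
  | cons a ys ih =>
    intro zs hp hys hzs
    cases zs with
    | nil => exact absurd hp.eq_nil (by simp)
    | cons b zs =>
      by_cases hab : a = b
      · subst hab
        rcases List.pairwise_cons.mp hys with ⟨_, hys'⟩
        rcases List.pairwise_cons.mp hzs with ⟨_, hzs'⟩
        rw [ih zs hp.cons_inv hys' hzs']
      · exfalso
        have ha : a ∈ b :: zs := hp.mem_iff.mp (by simp)
        have hb : b ∈ a :: ys := hp.mem_iff.mpr (by simp)
        have ha' : a ∈ zs := by rcases List.mem_cons.mp ha with h | h; exact absurd h hab; exact h
        have hb' : b ∈ ys := by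
          rcases List.mem_cons.mp hb with h | h
          · exact absurd h.symm hab
          · exact h
        exact hasym a b ((List.pairwise_cons.mp hys).1 b hb')
          ((List.pairwise_cons.mp hzs).1 a ha')

-- ---- the target order on (string, count) pairs ----
def pvGood2 (p q : String × Int) : Prop := q.2 < p.2 ∨ (p.2 = q.2 ∧ p.1 < q.1)

lemma pvGood2_trans (a b c : String × Int) (h1 : pvGood2 a b) (h2 : pvGood2 b c) : pvGood2 a c := by
  rcases h1 with h1 | ⟨h1, h1'⟩ <;> rcases h2 with h2 | ⟨h2, h2'⟩ <;> unfold pvGood2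
  · left; omega
  · left; omega
  · left; omega
  · right; exact ⟨by omega, lt_trans h1' h2'⟩

lemma pvGood2_asym (a b : String × Int) (h1 : pvGood2 a b) (h2 : pvGood2 b a) : False := by
  rcases h1 with h1 | ⟨h1, h1'⟩ <;> rcases h2 with h2 | ⟨h2, h2'⟩
  · omega
  · omega
  · omega
  · exact absurd (lt_trans h1' h2') (lt_irrefl _)

-- ---- the dict-building loop of A ----
lemma pv_scanA_eq (feq : List (Int × Int)) (d : PySem.Dict String Int) (e : Int) :
    pvScanA feq d e = match (PySem.Dict.mk feq).get? e with
      | some v => d.insert (PySem.Int.toStr e) v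
      | none => d := by
  induction feq generalizing d with
  | nil => rfl
  | cons p rest ih =>
    obtain ⟨k, v⟩ := p
    rw [pvScanA, PySem.Dict.get?_mk_cons]
    by_cases h : e = k
    · subst h; simp
    · simp only [beq_iff_eq, h, Ne.symm h, if_false, ih]

lemma pv_fold_items (feq : List (Int × Int)) :
    ∀ (tran : List Int) (E0 : List Int) (d : PySem.Dict String Int),
      E0.Nodup → (∀ e ∈ E0, ((PySem.Dict.mk feq).get? e).isSome) →
      d.items = E0.map (fun e => (PySem.Int.toStr e, (PySem.Dict.mk feq).getD e 0)) →
      (tran.foldl (fun d e => pvScanA feq d e) d).items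
        = (PySem.Set.update E0 (tran.filter (fun e => (PySem.Dict.mk feq).contains e))).map
            (fun e => (PySem.Int.toStr e, (PySem.Dict.mk feq).getD e 0)) := by
  intro tran
  induction tran with
  | nil =>
    intro E0 d _ _ hitems
    simpa [PySem.Set.update] using hitems
  | cons e tran ih =>
    intro E0 d hnd hsome hitems
    have hkeys : d.keys = E0.map PySem.Int.toStr := by
      have : d.keys = d.items.map (fun p => p.1) := rfl
      rw [this, hitems, List.map_map]
      rfl
    rw [List.foldl_cons]
    cases hget : (PySem.Dict.mk feq).get? e with
    | none =>
      have hcon : (PySem.Dict.mk feq).contains e = false := by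
        rw [PySem.Dict.contains_eq_isSome_get?, hget]; rfl
      have hstep : pvScanA feq d e = d := by rw [pv_scanA_eq, hget]
      have hfil : List.filter (fun e => (PySem.Dict.mk feq).contains e) (e :: tran)
          = List.filter (fun e => (PySem.Dict.mk feq).contains e) tran :=
        List.filter_cons_of_neg (by rw [hcon]; simp)
      rw [hstep, hfil]
      exact ih E0 d hnd hsome hitems
    | some v =>
      have hcon : (PySem.Dict.mk feq).contains e = true := by
        rw [PySem.Dict.contains_eq_isSome_get?, hget]; rfl
      have hval : (PySem.Dict.mk feq).getD e 0 = v := PySem.Dict.getD_of_get?_eq_some _ 0 hget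
      have hstep : pvScanA feq d e = d.insert (PySem.Int.toStr e) v := by
        rw [pv_scanA_eq, hget]
      have hfil : List.filter (fun e => (PySem.Dict.mk feq).contains e) (e :: tran)
          = e :: List.filter (fun e => (PySem.Dict.mk feq).contains e) tran :=
        List.filter_cons_of_pos hcon
      rw [hstep, hfil, PySem.Set.update_cons]
      by_cases he : e ∈ E0
      · rw [PySem.Set.add_of_mem he]
        apply ih E0 _ hnd hsome
        have hcontains : d.contains (PySem.Int.toStr e) = true := by
          rw [PySem.Dict.contains_iff_mem_keys, hkeys]
          exact List.mem_map_of_mem he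
        rw [PySem.Dict.items_insert_of_contains _ _ hcontains, hitems, List.map_map]
        apply List.map_congr_left
        intro x hx
        by_cases hxe : x = e
        · subst hxe; simp [hval]
        · have hne : PySem.Int.toStr x ≠ PySem.Int.toStr e := fun hc => hxe (pv_toStr_inj hc)
          simp [hne]
      · rw [PySem.Set.add_of_not_mem he]
        apply ih (E0 ++ [e]) _
          (by
            simp [List.nodup_append, hnd]
            exact fun a ha hb => he (hb ▸ ha))
          (by
            intro x hx
            rcases List.mem_append.mp hx with hx | hx
            · exact hsome x hx
            · rw [List.mem_singleton.mp hx, hget]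
              rfl)
        have hcontains : d.contains (PySem.Int.toStr e) = false := by
          cases hb : d.contains (PySem.Int.toStr e)
          · rfl
          · exfalso
            have := (PySem.Dict.contains_iff_mem_keys d (PySem.Int.toStr e)).mp hb
            rw [hkeys] at this
            rcases List.mem_map.mp this with ⟨x, hx, hxs⟩
            exact he (pv_toStr_inj hxs ▸ hx)
        rw [PySem.Dict.items_insert_of_not_contains _ _ hcontains, hitems, List.map_append]
        simp [hval]

-- ---- the three insertion orders used by the two ports ----
def pvBefL : (String × Int) → (String × Int) → Bool :=
  fun a b => decide (a.1 < b.1) || (!decide (b.1 < a.1) && decide (a.2 < b.2))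
def pvBefV : (String × Int) → (String × Int) → Bool := fun a b => decide (b.2 < a.2)
def pvBefR : (Int × Int) → (Int × Int) → Bool :=
  fun a b => decide (-a.2 < -b.2) || (!decide (-b.2 < -a.2) && decide (PySem.Int.toStr a.1 < PySem.Int.toStr b.1))

lemma pv_sorted2P (P : List (String × Int)) :
    PySem.List.sorted2 P (fun i => i.1) (fun i => i.2) =
      P.foldl (fun acc x => PySem.List.insertBy pvBefL x acc) [] := rfl
lemma pv_sortedV (X : List (String × Int)) :
    PySem.List.sorted X (fun k => k.2) true =
      X.foldl (fun acc x => PySem.List.insertBy pvBefV x acc) [] := rfl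
lemma pv_sorted2R (feq : List (Int × Int)) :
    PySem.List.sorted2 feq (fun kv => -kv.2) (fun kv => PySem.Int.toStr kv.1) =
      feq.foldl (fun acc x => PySem.List.insertBy pvBefR x acc) [] := rfl

lemma pv_set_contains_eq (s : PySem.Set Int) (k : Int) :
    PySem.Set.contains s k = decide (k ∈ s) := by
  by_cases h : k ∈ s
  · simp [h]
  · have hf : PySem.Set.contains s k = false := by
      cases hb : PySem.Set.contains s k
      · rfl
      · exact absurd ((PySem.Set.contains_iff s k).mp hb) h
    simp [hf]

-- ---- the per-transaction heart: A's double sort of the transaction's dict equals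
-- ---- B's globally sorted vocabulary filtered to the transaction ----
set_option maxHeartbeats 1600000 in
lemma pv_per_tran (feq : List (Int × Int)) (hnd : (feq.map Prod.fst).Nodup) (tran : List Int) :
    PySem.List.sorted
      (PySem.List.sorted2
        ((PySem.Set.ofList (tran.filter (fun e => (PySem.Dict.mk feq).contains e))).map
          (fun e => (PySem.Int.toStr e, (PySem.Dict.mk feq).getD e 0)))
        (fun i => i.1) (fun i => i.2))
      (fun k => k.2) true
    = ((PySem.List.sorted2 feq (fun kv => -kv.2) (fun kv => PySem.Int.toStr kv.1)).filter
        (fun p => decide (p.1 ∈ PySem.Set.ofList (tran.filter (fun e => (PySem.Dict.mk feq).contains e))))).map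
        (fun p => (PySem.Int.toStr p.1, p.2)) := by
  set Etr : List Int := PySem.Set.ofList (tran.filter (fun e => (PySem.Dict.mk feq).contains e)) with hEtrDef
  set f : Int → String × Int := fun e => (PySem.Int.toStr e, (PySem.Dict.mk feq).getD e 0) with hfDef
  set P : List (String × Int) := Etr.map f with hPDef
  set X : List (String × Int) := PySem.List.sorted2 P (fun i => i.1) (fun i => i.2) with hXDef
  set R : List (Int × Int) := PySem.List.sorted2 feq (fun kv => -kv.2) (fun kv => PySem.Int.toStr kv.1) with hRDef
  have hEtrNodup : Etr.Nodup := PySem.Set.nodup_ofList _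
  have hEtrKeys : ∀ x ∈ Etr, x ∈ feq.map Prod.fst := by
    intro x hx
    have hc : (PySem.Dict.mk feq).contains x = true :=
      List.of_mem_filter ((PySem.Set.mem_ofList _ x).mp hx)
    have := (PySem.Dict.contains_iff_mem_keys (PySem.Dict.mk feq) x).mp hc
    simpa [PySem.Dict.keys_mk] using this
  -- P has pairwise-distinct strings
  have hPmap : P.map (fun p => p.1) = Etr.map PySem.Int.toStr := by
    rw [hPDef, List.map_map]; rfl
  have hPside : P.Pairwise (fun p q => p.1 ≠ q.1) := by
    have : (P.map (fun p => p.1)).Nodup := by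
      rw [hPmap]; exact hEtrNodup.map pv_toStr_inj
    exact List.pairwise_map.mp this
  -- X = sorted2 P is strictly increasing in the string component
  have hX : X.Pairwise (fun p q => p.1 < q.1) := by
    rw [hXDef, pv_sorted2P]
    refine pv_foldl_insertBy_pairwise (fun p q => p.1 < q.1) pvBefL (fun p q => p.1 ≠ q.1)
      (fun a b c => lt_trans) ?_ ?_ P [] (by simp) hPside (by simp)
    · intro x y hb hne
      simp only [pvBefL, Bool.or_eq_true, Bool.and_eq_true, Bool.not_eq_true',
        decide_eq_true_eq, decide_eq_false_iff_not] at hb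
      rcases hb with h | ⟨h, _⟩
      · exact h
      · exact lt_of_le_of_ne (not_lt.mp h) (Ne.symm hne)
    · intro x y hb hne
      simp only [pvBefL, Bool.or_eq_false_iff, Bool.and_eq_false_iff, Bool.not_eq_false',
        decide_eq_true_eq, decide_eq_false_iff_not] at hb
      exact lt_of_le_of_ne (not_lt.mp hb.1) hne
  have hXperm : X.Perm P := by
    rw [hXDef, pv_sorted2P]
    simpa using PySem.List.foldl_insertBy_perm pvBefL P []
  -- the final A-side list
  have hZ : (PySem.List.sorted X (fun k => k.2) true).Pairwise pvGood2 := by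
    rw [pv_sortedV]
    refine pv_foldl_insertBy_pairwise pvGood2 pvBefV (fun y x => y.1 < x.1)
      pvGood2_trans ?_ ?_ X [] (by simp) hX (by simp)
    · intro x y hb _
      simp only [pvBefV, decide_eq_true_eq] at hb
      exact Or.inl hb
    · intro x y hb hlt
      simp only [pvBefV, decide_eq_false_iff_not, not_lt] at hb
      rcases lt_or_eq_of_le hb with h | h
      · exact Or.inl h
      · exact Or.inr ⟨h.symm, hlt⟩
  have hZperm : (PySem.List.sorted X (fun k => k.2) true).Perm P := by
    rw [pv_sortedV]
    have h := PySem.List.foldl_insertBy_perm pvBefV X []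
    simp only [List.nil_append] at h
    exact h.trans hXperm
  -- the B-side global order
  have hfeqSide : feq.Pairwise (fun p q => PySem.Int.toStr p.1 ≠ PySem.Int.toStr q.1) := by
    have : (feq.map (fun p => PySem.Int.toStr p.1)).Nodup := by
      have := hnd.map pv_toStr_inj
      rwa [List.map_map] at this
    exact List.pairwise_map.mp this
  have hR : R.Pairwise (fun p q => pvGood2 (PySem.Int.toStr p.1, p.2) (PySem.Int.toStr q.1, q.2)) := by
    rw [hRDef, pv_sorted2R]
    refine pv_foldl_insertBy_pairwise
      (fun p q => pvGood2 (PySem.Int.toStr p.1, p.2) (PySem.Int.toStr q.1, q.2)) pvBefR (fun p q => PySem.Int.toStr p.1 ≠ PySem.Int.toStr q.1)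
      (fun a b c => pvGood2_trans _ _ _) ?_ ?_ feq [] (by simp) hfeqSide (by simp)
    · intro x y hb _
      simp only [pvBefR, Bool.or_eq_true, Bool.and_eq_true, Bool.not_eq_true',
        decide_eq_true_eq, decide_eq_false_iff_not, neg_lt_neg_iff] at hb
      rcases hb with h | ⟨h, hs⟩
      · exact Or.inl h
      · rcases lt_or_eq_of_le (not_lt.mp h) with h' | h'
        · exact Or.inl h'
        · exact Or.inr ⟨h'.symm, hs⟩
    · intro x y hb hne
      simp only [pvBefR, Bool.or_eq_false_iff, Bool.and_eq_false_iff, Bool.not_eq_false',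
        decide_eq_true_eq, decide_eq_false_iff_not, neg_lt_neg_iff] at hb
      obtain ⟨h1, h2⟩ := hb
      rcases lt_or_eq_of_le (not_lt.mp h1) with h' | h'
      · exact Or.inl h'
      · rcases h2 with h2 | h2
        · exact absurd h2 (by omega)
        · exact Or.inr ⟨h'.symm, lt_of_le_of_ne (not_lt.mp h2) hne⟩
  have hRperm : R.Perm feq := by
    rw [hRDef, pv_sorted2R]
    simpa using PySem.List.foldl_insertBy_perm pvBefR feq []
  -- the B-side filtered list: pairwise and a permutation of P
  have hW : ((R.filter (fun p => decide (p.1 ∈ Etr))).map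
      (fun p => (PySem.Int.toStr p.1, p.2))).Pairwise pvGood2 :=
    List.pairwise_map.mpr (hR.filter _)
  have hfeq_eq : feq = (feq.map Prod.fst).map (fun k => (k, (PySem.Dict.mk feq).getD k 0)) := by
    have h := PySem.Dict.items_eq_map_keys (PySem.Dict.mk feq)
      (by simpa [PySem.Dict.keys_mk] using hnd) 0
    simpa [PySem.Dict.keys_mk] using h
  have hkf : ((feq.map Prod.fst).filter (fun k => decide (k ∈ Etr))).Perm Etr := by
    refine (List.perm_ext_iff_of_nodup (hnd.filter _) hEtrNodup).mpr ?_
    intro x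
    constructor
    · intro hx; simpa using (List.mem_filter.mp hx).2
    · intro hx
      exact List.mem_filter.mpr ⟨hEtrKeys x hx, by simpa using hx⟩
  have hWperm : ((R.filter (fun p => decide (p.1 ∈ Etr))).map
      (fun p => (PySem.Int.toStr p.1, p.2))).Perm P := by
    have h1 : (R.filter (fun p => decide (p.1 ∈ Etr))).Perm
        (feq.filter (fun p => decide (p.1 ∈ Etr))) := hRperm.filter _
    have h2 : feq.filter (fun p => decide (p.1 ∈ Etr))
        = ((feq.map Prod.fst).filter (fun k => decide (k ∈ Etr))).map
            (fun k => (k, (PySem.Dict.mk feq).getD k 0)) := by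
      conv_lhs => rw [hfeq_eq]
      rw [List.filter_map]
      rfl
    refine (h1.map (fun p => (PySem.Int.toStr p.1, p.2))).trans ?_
    rw [h2, List.map_map]
    exact hkf.map f
  exact pv_sorted_unique pvGood2 pvGood2_asym _ _ (hZperm.trans hWperm.symm) hZ hW

-- ---- the two ports agree ----
lemma pv_ports_agree (tran_lis : List (List Int)) (feq : List (Int × Int))
    (hnd : (feq.map Prod.fst).Nodup) :
    ele_in_trans_in_seq tran_lis feq = ele_in_trans_in_seq_alt tran_lis feq := by
  unfold ele_in_trans_in_seq ele_in_trans_in_seq_alt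
  simp only [PySem.List.foldl_append_singleton_eq_map, List.nil_append, List.map_map]
  apply List.map_congr_left
  intro tran _
  have hitems : (tran.foldl (fun tmp_dict e => pvScanA feq tmp_dict e) PySem.Dict.empty).items
      = (PySem.Set.ofList (tran.filter (fun e => (PySem.Dict.mk feq).contains e))).map
          (fun e => (PySem.Int.toStr e, (PySem.Dict.mk feq).getD e 0)) := by
    rw [pv_fold_items feq tran [] PySem.Dict.empty (by simp) (by simp) rfl]
    rw [PySem.Set.update_nil_left]
  simp only [Function.comp]
  rw [hitems, pv_per_tran feq hnd tran]
  rw [List.map_map]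
  have hfil : ((PySem.List.sorted2 feq (fun kv => -kv.2) (fun kv => PySem.Int.toStr kv.1)).map
        (fun kv => kv.1)).filter
        (fun k => PySem.Set.contains (PySem.Set.ofList (tran.filter (fun e => (PySem.Dict.mk feq).contains e))) k)
      = ((PySem.List.sorted2 feq (fun kv => -kv.2) (fun kv => PySem.Int.toStr kv.1)).filter
          (fun p => decide (p.1 ∈ PySem.Set.ofList (tran.filter (fun e => (PySem.Dict.mk feq).contains e))))).map
          (fun kv => kv.1) := by
    rw [List.filter_congr (fun x _ => pv_set_contains_eq _ x), List.filter_map]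
    rfl
  rw [hfil, List.map_map]
  rfl



-- ===== VERDICT (by name: the statement is the Claim_ definition above) =====
theorem ele_in_trans_in_seq_spec : Claim_equal_ele_in_trans_in_seq := by
  intro tran_lis feq_dict _ hpre
  unfold Spec_ele_in_trans_in_seq
  exact pv_ports_agree tran_lis feq_dict hpre
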